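-- pv_equiv track=rewrite | github.com/TimoAndy08/winter_game | src/frost_forge/tile_systems/room_generation.py | generate_room
-- ===== SOURCE A (Python) =====
-- def generate_room(material: str, location: tuple[int, int], size: tuple[int, int], floor: str, structure: str):
--     room = {}
--     for x in range(location[0], location[0] + size[0]):
--         for y in range(location[1], location[1] + size[1]):
--             room[x, y] = {"kind": material, "structure": structure, "floor": floor}
--     for x in range(location[0] + 1, location[0] + size[0] - 1):
--         for y in range(location[1] + 1, location[1] + size[1] - 1):
--             room[x, y] = {"structure": structure, "floor": floor}
--     return room
-- ===== SOURCE B (Python) =====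
-- def generate_room(material: str, location: tuple[int, int], size: tuple[int, int], floor: str, structure: str):
--     x0, y0 = location
--     w, h = size
--     return {
--         (x, y): ({"kind": material, "structure": structure, "floor": floor}
--                  if x == x0 or x == x0 + w - 1 or y == y0 or y == y0 + h - 1
--                  else {"structure": structure, "floor": floor})
--         for x in range(x0, x0 + w)
--         for y in range(y0, y0 + h)
--     }
-- ===== Notes on version B (the rewrite author's own statement) =====
-- stated objective: simpler
-- what changed: A fills the whole rectangle with border tiles and then overwrites the interior in a second pass; B is a single dict comprehension that writes each cell exactly once, picking the border or interior tile by an explicit border test.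
import Mathlib
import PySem

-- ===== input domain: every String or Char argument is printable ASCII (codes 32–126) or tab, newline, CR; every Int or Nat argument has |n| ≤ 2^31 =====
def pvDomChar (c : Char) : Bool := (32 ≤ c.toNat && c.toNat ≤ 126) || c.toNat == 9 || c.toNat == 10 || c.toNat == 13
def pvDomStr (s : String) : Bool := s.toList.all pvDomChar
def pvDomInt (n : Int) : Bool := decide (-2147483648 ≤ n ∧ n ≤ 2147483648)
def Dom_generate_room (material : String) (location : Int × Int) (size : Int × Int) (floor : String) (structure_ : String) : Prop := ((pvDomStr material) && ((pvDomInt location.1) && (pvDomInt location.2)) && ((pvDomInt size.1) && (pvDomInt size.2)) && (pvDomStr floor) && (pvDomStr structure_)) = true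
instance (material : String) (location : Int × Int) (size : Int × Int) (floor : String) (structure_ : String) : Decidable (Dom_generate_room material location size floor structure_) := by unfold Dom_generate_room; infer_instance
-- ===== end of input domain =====

-- B replaces A's two-pass fill-then-overwrite with a single comprehension that writes each
-- cell once, choosing the border or interior tile by an explicit border test (objective: simpler).

-- ===== PORT A =====
def generate_room (material : String) (location : Int × Int) (size : Int × Int) (floor : String) (structure_ : String) : List (Int × Int × List (String × String)) :=
  let room : PySem.Dict (Int × Int) (List (String × String)) :=
    (PySem.List.pyRange location.1 (location.1 + size.1) 1).foldl (fun r x =>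
      (PySem.List.pyRange location.2 (location.2 + size.2) 1).foldl (fun r y =>
        r.insert (x, y) [("kind", material), ("structure", structure_), ("floor", floor)]) r)
      PySem.Dict.empty
  let room2 :=
    (PySem.List.pyRange (location.1 + 1) (location.1 + size.1 - 1) 1).foldl (fun r x =>
      (PySem.List.pyRange (location.2 + 1) (location.2 + size.2 - 1) 1).foldl (fun r y =>
        r.insert (x, y) [("structure", structure_), ("floor", floor)]) r)
      room
  room2.items.map (fun p => (p.1.1, p.1.2, p.2))

-- ===== PORT B =====
-- The dict comprehension in Source B ranges over pairwise-distinct keys (x, y), so the resulting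
-- dict's items are exactly this flatMap, in iteration order — exact.
def generate_room_alt (material : String) (location : Int × Int) (size : Int × Int) (floor : String) (structure_ : String) : List (Int × Int × List (String × String)) :=
  (PySem.List.pyRange location.1 (location.1 + size.1) 1).flatMap (fun x =>
    (PySem.List.pyRange location.2 (location.2 + size.2) 1).map (fun y =>
      (x, y,
        if x = location.1 ∨ x = location.1 + size.1 - 1 ∨ y = location.2 ∨ y = location.2 + size.2 - 1
        then [("kind", material), ("structure", structure_), ("floor", floor)]
        else [("structure", structure_), ("floor", floor)])))

-- ===== PRECONDITION & SPEC =====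
def Spec_generate_room (material : String) (location : Int × Int) (size : Int × Int) (floor : String) (structure_ : String) (out : List (Int × Int × List (String × String))) : Prop := out = generate_room_alt material location size floor structure_
instance (material : String) (location : Int × Int) (size : Int × Int) (floor : String) (structure_ : String) (out : List (Int × Int × List (String × String))) : Decidable (Spec_generate_room material location size floor structure_ out) := by unfold Spec_generate_room; infer_instance

-- ===== CLAIM (what is proved, stated in full; the proofs are below) =====
def Claim_equal_generate_room : Prop := ∀ (material : String) (location : Int × Int) (size : Int × Int) (floor : String) (structure_ : String), Dom_generate_room material location size floor structure_ → Spec_generate_room material location size floor structure_ (generate_room material location size floor structure_)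

-- ===== LEMMAS AND PROOFS =====

-- getD after one row of constant-value inserts
theorem getD_row_insert {ν : Type} (l : List Int) (x : Int) (v : ν) (d : PySem.Dict (Int × Int) ν) (k : Int × Int) (d0 : ν) :
    (l.foldl (fun r y => r.insert (x, y) v) d).getD k d0
      = if k.1 = x ∧ k.2 ∈ l then v else d.getD k d0 := by
  induction l generalizing d with
  | nil => simp
  | cons a l ih =>
    obtain ⟨kx, ky⟩ := k
    simp only [List.foldl_cons, ih, PySem.Dict.getD_insert, List.mem_cons]
    by_cases h1 : kx = x ∧ ky ∈ l
    · simp [h1]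
    · by_cases h2 : (kx, ky) = (x, a)
      · obtain ⟨hx, hy⟩ := Prod.mk.injEq .. ▸ h2
        simp_all
      · have : ¬(kx = x ∧ (ky = a ∨ ky ∈ l)) := by
          rintro ⟨hx, hy | hy⟩
          · exact h2 (by simp [hx, hy])
          · exact h1 ⟨hx, hy⟩
        simp [h1, h2, this]

-- getD after a whole grid of constant-value inserts
theorem getD_grid_insert {ν : Type} (xs ys : List Int) (v : ν) (d : PySem.Dict (Int × Int) ν) (k : Int × Int) (d0 : ν) :
    (xs.foldl (fun r x => ys.foldl (fun r y => r.insert (x, y) v) r) d).getD k d0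
      = if k.1 ∈ xs ∧ k.2 ∈ ys then v else d.getD k d0 := by
  induction xs generalizing d with
  | nil => simp
  | cons a xs ih =>
    simp only [List.foldl_cons, ih, getD_row_insert, List.mem_cons]
    by_cases h1 : k.1 ∈ xs ∧ k.2 ∈ ys
    · simp [h1]
    · by_cases h2 : k.1 = a ∧ k.2 ∈ ys
      · simp [h2]
      · have : ¬((k.1 = a ∨ k.1 ∈ xs) ∧ k.2 ∈ ys) := by
          rintro ⟨hx | hx, hy⟩
          · exact h2 ⟨hx, hy⟩
          · exact h1 ⟨hx, hy⟩
        simp [h1, h2, this]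

-- keys are unchanged by a row of inserts at already-present keys
theorem keys_row_insert_mem {ν : Type} (l : List Int) (x : Int) (v : ν) (d : PySem.Dict (Int × Int) ν)
    (h : ∀ y ∈ l, (x, y) ∈ d.keys) :
    (l.foldl (fun r y => r.insert (x, y) v) d).keys = d.keys := by
  induction l generalizing d with
  | nil => rfl
  | cons a l ih =>
    have hc : d.contains (x, a) = true := by
      rw [PySem.Dict.contains_eq_decide_mem_keys]
      exact decide_eq_true (h a (by simp))
    have hk : (d.insert (x, a) v).keys = d.keys := PySem.Dict.keys_insert_of_contains _ _ hc
    simp only [List.foldl_cons]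
    rw [ih _ (fun y hy => by rw [hk]; exact h y (List.mem_cons_of_mem _ hy)), hk]

-- keys are unchanged by a grid of inserts at already-present keys
theorem keys_grid_insert_mem {ν : Type} (xs ys : List Int) (v : ν) (d : PySem.Dict (Int × Int) ν)
    (h : ∀ x ∈ xs, ∀ y ∈ ys, (x, y) ∈ d.keys) :
    (xs.foldl (fun r x => ys.foldl (fun r y => r.insert (x, y) v) r) d).keys = d.keys := by
  induction xs generalizing d with
  | nil => rfl
  | cons a xs ih =>
    have hk : ((ys.foldl (fun r y => r.insert (a, y) v) d)).keys = d.keys :=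
      keys_row_insert_mem ys a v d (h a (by simp))
    simp only [List.foldl_cons]
    rw [ih _ (fun x hx y hy => by rw [hk]; exact h x (List.mem_cons_of_mem _ hx) y hy), hk]

-- items after a grid of inserts at fresh distinct keys: append, row-major
theorem items_grid_insert_fresh {ν : Type} (xs ys : List Int) (v : ν) (d : PySem.Dict (Int × Int) ν)
    (hxs : xs.Nodup) (hys : ys.Nodup)
    (h : ∀ x ∈ xs, ∀ y, d.contains (x, y) = false) :
    (xs.foldl (fun r x => ys.foldl (fun r y => r.insert (x, y) v) r) d).items
      = d.items ++ xs.flatMap (fun x => ys.map (fun y => ((x, y), v))) := by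
  induction xs generalizing d with
  | nil => simp
  | cons a xs ih =>
    have hrow : ((ys.foldl (fun r y => r.insert (a, y) v) d)).items
        = d.items ++ ys.map (fun y => ((a, y), v)) := by
      have := PySem.Dict.items_foldl_insert_fresh (l := ys) (k := fun y => (a, y))
        (v := fun _ => v) (d := d) (fun y _ => h a (by simp) y)
        (by
          refine List.Nodup.map ?_ hys
          intro y1 y2 hy; exact (Prod.mk.injEq .. ▸ hy).2)
      exact this
    have ha : a ∉ xs := (List.nodup_cons.mp hxs).1
    have hfresh : ∀ x ∈ xs, ∀ y, ((ys.foldl (fun r y => r.insert (a, y) v) d)).contains (x, y) = false := by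
      intro x hx y
      rw [PySem.Dict.contains_eq_decide_mem_keys]
      apply decide_eq_false
      intro hmem
      have : (x, y) ∈ ((ys.foldl (fun r y => r.insert (a, y) v) d)).items.map (·.1) := by
        simpa [PySem.Dict.keys] using hmem
      rw [hrow] at this
      simp only [List.map_append, List.mem_append, List.map_map, List.mem_map] at this
      rcases this with hl | ⟨y', _, hy'⟩
      · have : ((x, y) ∈ d.keys) := by simpa [PySem.Dict.keys] using hl
        have hc := h x (by simp [hx]) y
        rw [PySem.Dict.contains_eq_decide_mem_keys] at hc
        exact absurd this (of_decide_eq_false hc)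
      · have : x = a := (Prod.mk.injEq .. ▸ hy'.symm).1
        exact ha (this ▸ hx)
    simp only [List.foldl_cons]
    rw [ih _ (List.nodup_cons.mp hxs).2 hfresh, hrow]
    simp [List.flatMap_cons]

-- keys stay Nodup through a grid of inserts
theorem nodup_keys_grid_insert {ν : Type} (xs ys : List Int) (v : ν) (d : PySem.Dict (Int × Int) ν)
    (h : d.keys.Nodup) :
    (xs.foldl (fun r x => ys.foldl (fun r y => r.insert (x, y) v) r) d).keys.Nodup := by
  induction xs generalizing d with
  | nil => exact h
  | cons a xs ih =>
    simp only [List.foldl_cons]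
    exact ih _ (PySem.Dict.nodup_keys_foldl_insert_key ys (fun y => (a, y)) (fun _ _ => v) d h)

-- ===== VERDICT (by name: the statement is the Claim_ definition above) =====
theorem generate_room_spec : Claim_equal_generate_room := by
  intro material location size floor structure_ _
  unfold Spec_generate_room generate_room generate_room_alt
  obtain ⟨x0, y0⟩ := location
  obtain ⟨w, h⟩ := size
  simp only
  set kb : List (String × String) := [("kind", material), ("structure", structure_), ("floor", floor)] with hkb
  set ki : List (String × String) := [("structure", structure_), ("floor", floor)] with hki
  set X := PySem.List.pyRange x0 (x0 + w) 1 with hX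
  set Y := PySem.List.pyRange y0 (y0 + h) 1 with hY
  set Xi := PySem.List.pyRange (x0 + 1) (x0 + w - 1) 1 with hXi
  set Yi := PySem.List.pyRange (y0 + 1) (y0 + h - 1) 1 with hYi
  set room := X.foldl (fun r x => Y.foldl (fun r y => r.insert (x, y) kb) r)
      (PySem.Dict.empty : PySem.Dict (Int × Int) (List (String × String))) with hroom
  set room2 := Xi.foldl (fun r x => Yi.foldl (fun r y => r.insert (x, y) ki) r) room with hroom2
  have hitems1 : room.items = X.flatMap (fun x => Y.map (fun y => ((x, y), kb))) := by
    rw [hroom, items_grid_insert_fresh X Y kb _ (PySem.List.nodup_pyRange_one ..)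
      (PySem.List.nodup_pyRange_one ..) (fun _ _ _ => PySem.Dict.contains_empty _)]
    simp [PySem.Dict.empty]
  have hkeys1 : room.keys = X.flatMap (fun x => Y.map (fun y => (x, y))) := by
    simp [PySem.Dict.keys, hitems1, List.map_flatMap, Function.comp_def]
  have hkeys2 : room2.keys = room.keys := by
    apply keys_grid_insert_mem
    intro x hx y hy
    rw [hkeys1]
    simp only [List.mem_flatMap, List.mem_map]
    rw [hXi, PySem.List.mem_pyRange_one] at hx
    rw [hYi, PySem.List.mem_pyRange_one] at hy
    exact ⟨x, by rw [hX, PySem.List.mem_pyRange_one]; omega,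
           y, by rw [hY, PySem.List.mem_pyRange_one]; omega, rfl⟩
  have hnd2 : room2.keys.Nodup := by
    rw [hkeys2]
    exact nodup_keys_grid_insert X Y kb _ (by simp)
  have hitems2 : room2.items = room2.keys.map (fun k => (k, room2.getD k [])) :=
    PySem.Dict.items_eq_map_keys _ hnd2 []
  rw [hitems2, hkeys2, hkeys1]
  simp only [List.map_flatMap, List.map_map]
  refine List.flatMap_congr ?_
  intro x hx
  refine List.map_congr_left ?_
  intro y hy
  have h2v := getD_grid_insert Xi Yi ki room ((x, y) : Int × Int) ([] : List (String × String))
  have h1v := getD_grid_insert X Y kb (PySem.Dict.empty : PySem.Dict (Int × Int) (List (String × String)))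
    ((x, y) : Int × Int) ([] : List (String × String))
  rw [hX, PySem.List.mem_pyRange_one] at hx
  rw [hY, PySem.List.mem_pyRange_one] at hy
  simp only [Function.comp_apply, ← hroom2] at *
  rw [h2v, h1v]
  simp only [hXi, hYi, hX, hY, PySem.List.mem_pyRange_one, PySem.Dict.getD_empty]
  split_ifs <;> first | rfl | (exfalso; omega)
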